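-- pv_equiv track=rewrite | github.com/lbliii/bengal | bengal/utils/paths/url_normalization.py | _collapse_slashes
-- ===== SOURCE A (Python) =====
-- def _collapse_slashes(url: str) -> str:
--     """Replace runs of consecutive slashes with a single slash (pure string ops)."""
--     if "//" not in url:
--         return url
--     parts = url.split("/")
--     out = [parts[0]]
--     for p in parts[1:]:
--         if p or out[-1:] != [""]:
--             out.append(p)
--         elif out and out[-1] == "":
--             continue
--         else:
--             out.append(p)
--     result = "/".join(p for p in out if p) or ""
--     if url.startswith("/"):
--         result = "/" + result
--     return result
-- ===== SOURCE B (Python) =====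
-- def _collapse_slashes(url: str) -> str:
--     """Replace runs of consecutive slashes with a single slash (pure string ops)."""
--     if "//" not in url:
--         return url
--     out = []
--     for ch in url:
--         if ch != "/" or not out or out[-1] != "/":
--             out.append(ch)
--     if len(out) > 1 and out[-1] == "/":
--         out.pop()
--     return "".join(out)
-- ===== Notes on version B (the rewrite author's own statement) =====
-- stated objective: simpler
-- what changed: Replaces split-into-components / guarded re-append loop / filter-join-reprefix with a single character scan that skips a slash immediately following another slash, then strips one trailing slash; no component lists are built.
import Mathlib
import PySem

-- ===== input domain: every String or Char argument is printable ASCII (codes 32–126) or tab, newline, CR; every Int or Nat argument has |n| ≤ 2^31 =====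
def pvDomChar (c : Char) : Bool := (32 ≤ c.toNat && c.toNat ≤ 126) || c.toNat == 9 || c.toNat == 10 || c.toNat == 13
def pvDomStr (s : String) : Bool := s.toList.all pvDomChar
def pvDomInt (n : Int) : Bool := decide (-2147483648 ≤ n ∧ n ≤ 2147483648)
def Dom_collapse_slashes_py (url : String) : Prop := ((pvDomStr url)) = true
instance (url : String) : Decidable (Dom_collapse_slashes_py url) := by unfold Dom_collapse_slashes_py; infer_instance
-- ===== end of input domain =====

-- B collapses the slash runs by one character scan plus a single trailing-slash strip,
-- instead of A's split / guarded re-append loop / filter-join-reprefix; same return value.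

-- ===== PORT A =====
def collapse_slashes_py (url : String) : String :=
  if PySem.Str.isIn "//" url then
    -- parts = url.split("/"); split? is some (split never fails for a nonempty separator)
    match (PySem.Str.split? url "/").getD [] with
    | [] => url   -- unreachable: split always yields at least one part
    | p0 :: rest =>
      -- out = [parts[0]]; for p in parts[1:]: if p or out[-1:] != [""]: … elif …: continue else: …
      let out := rest.foldl (fun out p =>
        if p ≠ "" ∨ PySem.List.slice out (some (-1)) none ≠ [""] then out ++ [p]
        else if out ≠ [] ∧ out.getLast? = some "" then out
        else out ++ [p]) [p0]
      -- result = "/".join(p for p in out if p) or ""   (the `or ""` is the identity on strings)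
      let result := PySem.Str.join "/" (out.filter (fun p => p ≠ ""))
      if PySem.Str.startswith url "/" then "/" ++ result else result
  else url

-- ===== PORT B =====
def collapse_slashes_py_alt (url : String) : String :=
  if PySem.Str.isIn "//" url then
    let out := url.toList.foldl (fun out ch =>
      if ch ≠ '/' ∨ out = [] ∨ out.getLast? ≠ some '/' then out ++ [ch] else out) []
    let out := if out.length > 1 ∧ out.getLast? = some '/' then out.dropLast else out
    String.ofList out
  else url

-- ===== PRECONDITION & SPEC =====
def Spec_collapse_slashes_py (url : String) (out : String) : Prop := out = collapse_slashes_py_alt url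
instance (url : String) (out : String) : Decidable (Spec_collapse_slashes_py url out) := by unfold Spec_collapse_slashes_py; infer_instance

-- ===== CLAIM (what is proved, stated in full; the proofs are below) =====
def Claim_equal_collapse_slashes_py : Prop := ∀ (url : String), Dom_collapse_slashes_py url → Spec_collapse_slashes_py url (collapse_slashes_py url)

-- ===== LEMMAS AND PROOFS =====

def segs : List Char → List (List Char)
  | [] => [[]]
  | c :: t => if c = '/' then [] :: segs t else
      match segs t with
      | [] => [[c]]
      | h :: r => (c :: h) :: r

theorem segs_ne_nil (cs : List Char) : segs cs ≠ [] := by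
  cases cs with
  | nil => simp [segs]
  | cons c t => simp only [segs]; split <;> [simp; split <;> simp]

def consFirst (pre : List Char) : List (List Char) → List (List Char)
  | [] => [pre]
  | h :: r => (pre ++ h) :: r

theorem go_eq (l : List Char) : ∀ (fuel : Nat) (cur : List Char) (acc : List (List Char)),
    l.length < fuel →
    PySem.Chars.splitOn.go ['/'] fuel l cur acc = acc.reverse ++ consFirst cur.reverse (segs l) := by
  induction l with
  | nil =>
    intro fuel cur acc h
    match fuel with
    | fuel + 1 => simp [PySem.Chars.splitOn.go, segs, consFirst]
  | cons c t ih =>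
    intro fuel cur acc h
    match fuel with
    | fuel + 1 =>
      rw [PySem.Chars.splitOn.go]
      by_cases hc : c = '/'
      · subst hc
        have hpfx : List.isPrefixOf ['/'] ('/' :: t) = true := by simp [List.isPrefixOf]
        rw [if_pos hpfx]
        have : List.drop (['/'] : List Char).length ('/' :: t) = t := by simp
        rw [this, ih fuel [] _ (by simpa using Nat.lt_of_succ_lt_succ h)]
        rcases hs : segs t with _ | ⟨h1, r⟩
        · exact absurd hs (segs_ne_nil t)
        · simp [segs, hs, consFirst]
      · have hpfx : List.isPrefixOf ['/'] (c :: t) = false := by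
          simp [List.isPrefixOf]; exact fun e => hc e.symm
        rw [if_neg (by simp [hpfx])]
        rw [ih fuel (c :: cur) acc (by simpa using Nat.lt_of_succ_lt_succ h)]
        rcases hs : segs t with _ | ⟨h1, r⟩
        · exact absurd hs (segs_ne_nil t)
        · simp [segs, hs, consFirst, hc]

theorem splitOn_eq_segs (cs : List Char) : PySem.Chars.splitOn cs ['/'] = segs cs := by
  rw [PySem.Chars.splitOn, go_eq cs (cs.length + 1) [] [] (by omega)]
  rcases hs : segs cs with _ | ⟨h1, r⟩
  · exact absurd hs (segs_ne_nil cs)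
  · simp [consFirst]

def bcoll : List Char → List Char
  | [] => []
  | [c] => [c]
  | c1 :: c2 :: t => if c1 = '/' ∧ c2 = '/' then bcoll (c2 :: t) else c1 :: bcoll (c2 :: t)

def wordsOf (cs : List Char) : List (List Char) := (segs cs).filter (· ≠ [])
def rhs (cs : List Char) : List Char :=
  (if cs.head? = some '/' then ['/'] else []) ++ PySem.Chars.join ['/'] (wordsOf cs) ++
  (if cs.getLast? = some '/' ∧ wordsOf cs ≠ [] then ['/'] else [])

theorem wordsOf_slash (t : List Char) : wordsOf ('/' :: t) = wordsOf t := by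
  simp [wordsOf, segs]

theorem wordsOf_cons (c : Char) (t : List Char) (hc : c ≠ '/') :
    ∃ h r, segs t = h :: r ∧ segs (c :: t) = (c :: h) :: r ∧
      wordsOf (c :: t) = (c :: h) :: r.filter (· ≠ []) ∧
      wordsOf t = (if h = [] then [] else [h]) ++ r.filter (· ≠ []) := by
  rcases hs : segs t with _ | ⟨h, r⟩
  · exact absurd hs (segs_ne_nil t)
  · refine ⟨h, r, rfl, by simp [segs, hc, hs], by simp [wordsOf, segs, hc, hs], by
      simp [wordsOf, hs]; split <;> simp_all⟩

theorem wordsOf_nil_all_slash (cs : List Char) (h : wordsOf cs = []) : ∀ x ∈ cs, x = '/' := by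
  induction cs with
  | nil => simp
  | cons c t ih =>
    by_cases hc : c = '/'
    · subst hc; rw [wordsOf_slash] at h
      intro x hx
      rcases List.mem_cons.mp hx with hx | hx
      · exact hx
      · exact ih h x hx
    · obtain ⟨h1, r, _, _, hw, _⟩ := wordsOf_cons c t hc
      rw [hw] at h; simp at h

theorem join_cons_word (c : Char) (w : List Char) (ws : List (List Char)) :
    PySem.Chars.join ['/'] ((c :: w) :: ws) = c :: PySem.Chars.join ['/'] (w :: ws) := by
  cases ws with
  | nil => simp [PySem.Chars.join_singleton]
  | cons q rest => rw [PySem.Chars.join_cons_cons, PySem.Chars.join_cons_cons]; simp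

theorem all_slash_getLast (t : List Char) (h : ∀ x ∈ t, x = '/') :
    ('/' :: t).getLast? = some '/' := by
  induction t with
  | nil => rfl
  | cons a t ih =>
    rw [List.getLast?_cons_cons]
    have ha : a = '/' := h a (by simp)
    subst ha
    exact ih fun x hx => h x (by simp [hx])

theorem rhs_cons (c : Char) (r : List Char) (hr : r ≠ []) :
    rhs (c :: r) = if c = '/' ∧ r.head? = some '/' then rhs r else c :: rhs r := by
  rcases r with _ | ⟨c2, t⟩
  · exact absurd rfl hr
  have hlast : (c :: c2 :: t).getLast? = (c2 :: t).getLast? := List.getLast?_cons_cons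
  by_cases hc : c = '/'
  · subst hc
    by_cases hc2 : c2 = '/'
    · subst hc2
      rw [if_pos ⟨rfl, by simp⟩]
      rw [rhs, rhs, wordsOf_slash, hlast]
      simp
    · rw [if_neg (by simp [hc2])]
      rw [rhs, rhs, wordsOf_slash, hlast]
      simp [hc2]
  · rw [if_neg (by simp [hc])]
    by_cases hc2 : c2 = '/'
    · subst hc2
      obtain ⟨h1, r1, hs, hsc, hw, _⟩ := wordsOf_cons c ('/' :: t) hc
      have hseg : segs ('/' :: t) = [] :: segs t := by simp [segs]
      rw [hseg] at hs
      obtain ⟨rfl, rfl⟩ : h1 = [] ∧ r1 = segs t :=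
        ⟨((List.cons.injEq ..).mp hs).1.symm, ((List.cons.injEq ..).mp hs).2.symm⟩
      have hwc : wordsOf (c :: '/' :: t) = [c] :: wordsOf t := by
        rw [hw]; rfl
      rcases hwt : wordsOf t with _ | ⟨w, ws⟩
      · have hL : ('/' :: t).getLast? = some '/' :=
          all_slash_getLast t (wordsOf_nil_all_slash t hwt)
        rw [rhs, rhs, hwc, hwt, wordsOf_slash, hwt, hlast, hL]
        simp [hc, PySem.Chars.join_singleton, PySem.Chars.join_nil]
      · rw [rhs, rhs, hwc, hwt, wordsOf_slash, hwt, hlast]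
        rw [PySem.Chars.join_cons_cons]
        simp [hc]
    · obtain ⟨h1, r1, hs, hsc, hw1, hw2⟩ := wordsOf_cons c2 t hc2
      obtain ⟨h2, r2, hs2, hsc2, hw3, hw4⟩ := wordsOf_cons c (c2 :: t) hc
      rw [hsc] at hs2
      obtain ⟨rfl, rfl⟩ : h2 = c2 :: h1 ∧ r2 = r1 := by
        constructor <;> [exact ((List.cons.injEq ..).mp hs2).1.symm; exact ((List.cons.injEq ..).mp hs2).2.symm]
      rw [rhs, rhs, hw3, hw1, hlast]
      rw [join_cons_word]
      simp [hc, hc2]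

theorem bcoll_eq_rhs (cs : List Char) (h : cs ≠ []) : bcoll cs = rhs cs := by
  induction cs with
  | nil => exact absurd rfl h
  | cons c1 t ih =>
    rcases t with _ | ⟨c2, t⟩
    · by_cases hc : c1 = '/'
      · subst hc; rfl
      · show [c1] = rhs [c1]
        rw [rhs]
        simp [wordsOf, segs, hc, PySem.Chars.join_singleton]
    · rw [rhs_cons c1 (c2 :: t) (by simp)]
      rw [show bcoll (c1 :: c2 :: t) = if c1 = '/' ∧ c2 = '/' then bcoll (c2 :: t)
            else c1 :: bcoll (c2 :: t) from rfl]
      rw [ih (by simp)]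
      simp only [List.head?_cons, Option.some.injEq]

-- words facts
theorem segs_no_slash (cs : List Char) : ∀ w ∈ segs cs, '/' ∉ w := by
  induction cs with
  | nil => simp [segs]
  | cons c t ih =>
    by_cases hc : c = '/'
    · subst hc
      simp only [segs]
      intro w hw
      rcases List.mem_cons.mp hw with rfl | hw
      · simp
      · exact ih w hw
    · rcases hs : segs t with _ | ⟨h1, r⟩
      · exact absurd hs (segs_ne_nil t)
      · simp only [segs, if_neg hc, hs]
        intro w hw
        rcases List.mem_cons.mp hw with rfl | hw
        · have h1' := ih h1 (hs ▸ List.mem_cons_self ..)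
          simp [Ne.symm hc, h1']
        · exact ih w (hs ▸ List.mem_cons_of_mem _ hw)

theorem words_ne_nil (cs : List Char) : ∀ w ∈ wordsOf cs, w ≠ [] := by
  intro w hw
  simpa using (List.mem_filter.mp hw).2

theorem words_no_slash (cs : List Char) : ∀ w ∈ wordsOf cs, '/' ∉ w :=
  fun w hw => segs_no_slash cs w (List.mem_filter.mp hw).1

theorem join_ne_nil (W : List (List Char)) (hW : W ≠ []) (hne : ∀ w ∈ W, w ≠ []) :
    PySem.Chars.join ['/'] W ≠ [] := by
  rcases W with _ | ⟨w, ws⟩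
  · exact absurd rfl hW
  rcases ws with _ | ⟨q, ws⟩
  · rw [PySem.Chars.join_singleton]; exact hne w (by simp)
  · rw [PySem.Chars.join_cons_cons]
    have := hne w (by simp)
    simp [this]

theorem join_last_ne_slash (W : List (List Char)) (hW : W ≠ []) (hne : ∀ w ∈ W, w ≠ [])
    (hns : ∀ w ∈ W, '/' ∉ w) : (PySem.Chars.join ['/'] W).getLast? ≠ some '/' := by
  induction W with
  | nil => exact absurd rfl hW
  | cons w ws ih =>
    rcases ws with _ | ⟨q, ws⟩
    · rw [PySem.Chars.join_singleton]
      have hw := hne w (by simp)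
      intro hcontra
      have := List.mem_of_getLast? hcontra
      exact hns w (by simp) this
    · rw [PySem.Chars.join_cons_cons]
      have hjoin := join_ne_nil (q :: ws) (by simp) (fun x hx => hne x (List.mem_cons_of_mem _ hx))
      rw [List.getLast?_append_of_ne_nil _ hjoin]
      exact ih (by simp) (fun x hx => hne x (List.mem_cons_of_mem _ hx))
        (fun x hx => hns x (List.mem_cons_of_mem _ hx))

-- B's fold computes bcoll
theorem foldB (t : List Char) : ∀ (a : List Char) (p : Char),
    t.foldl (fun out ch =>
      if ch ≠ '/' ∨ out = [] ∨ out.getLast? ≠ some '/' then out ++ [ch] else out) (a ++ [p]) =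
    a ++ bcoll (p :: t) := by
  induction t with
  | nil => intro a p; simp [bcoll]
  | cons c t ih =>
    intro a p
    rw [List.foldl_cons]
    by_cases hpc : c = '/' ∧ p = '/'
    · obtain ⟨rfl, rfl⟩ := hpc
      rw [if_neg (by simp)]
      rw [ih a '/']
      rfl
    · have hcond : (c ≠ '/' ∨ a ++ [p] = [] ∨ (a ++ [p]).getLast? ≠ some '/') := by
        rcases Decidable.not_and_iff_or_not.mp hpc with h | h
        · exact Or.inl h
        · exact Or.inr (Or.inr (by simp [h]))
      rw [if_pos hcond]
      rw [show a ++ [p] ++ [c] = (a ++ [p]) ++ [c] from rfl, ih (a ++ [p]) c]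
      have : bcoll (p :: c :: t) = p :: bcoll (c :: t) := by
        rw [show bcoll (p :: c :: t) = if p = '/' ∧ c = '/' then bcoll (c :: t)
              else p :: bcoll (c :: t) from rfl, if_neg (fun h => hpc ⟨h.2, h.1⟩)]
      rw [this]; simp

theorem slice_neg_one (a : List String) (p : String) :
    PySem.List.slice (a ++ [p]) (some (-1)) none = [p] := by
  simp [PySem.List.slice, PySem.List.clampIdx]
  split <;> omega

-- A's loop, after the nonempty filter, is just the original parts filtered
theorem foldA (ps : List String) : ∀ (a : List String) (p : String),
    ((ps.foldl (fun out p =>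
        if p ≠ "" ∨ PySem.List.slice out (some (-1)) none ≠ [""] then out ++ [p]
        else if out ≠ [] ∧ out.getLast? = some "" then out
        else out ++ [p]) (a ++ [p])).filter (· ≠ "")) =
    (a ++ [p]).filter (· ≠ "") ++ ps.filter (· ≠ "") := by
  induction ps with
  | nil => intro a p; simp
  | cons q ps ih =>
    intro a p
    rw [List.foldl_cons]
    by_cases hq : q ≠ "" ∨ p ≠ ""
    · have hcond : q ≠ "" ∨ PySem.List.slice (a ++ [p]) (some (-1)) none ≠ [""] := by
        rw [slice_neg_one]
        rcases hq with h | h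
        · exact Or.inl h
        · exact Or.inr (by simp [h])
      rw [if_pos hcond]
      rw [show a ++ [p] ++ [q] = (a ++ [p]) ++ [q] from rfl, ih (a ++ [p]) q]
      simp only [List.filter_append, List.filter_cons]
      split <;> split <;> simp
    · push Not at hq
      obtain ⟨rfl, rfl⟩ := hq
      rw [if_neg (by simp [slice_neg_one]), if_pos (by simp)]
      rw [ih a ""]
      simp

theorem strip_rhs (cs : List Char) (h : cs ≠ []) :
    (if (rhs cs).length > 1 ∧ (rhs cs).getLast? = some '/' then (rhs cs).dropLast else rhs cs)
    = (if cs.head? = some '/' then ['/'] else []) ++ PySem.Chars.join ['/'] (wordsOf cs) := by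
  rcases hw : wordsOf cs with _ | ⟨w, ws⟩
  · have hall := wordsOf_nil_all_slash cs hw
    rcases cs with _ | ⟨c, t⟩
    · exact absurd rfl h
    have hc : c = '/' := hall c (by simp)
    subst hc
    have hhead : ('/' :: t).head? = some '/' := rfl
    have hrhs : rhs ('/' :: t) = ['/'] := by
      rw [rhs, hw, hhead]
      simp [PySem.Chars.join_nil]
    rw [hrhs, hhead]
    simp [PySem.Chars.join_nil]
  · have hne := words_ne_nil cs
    have hns := words_no_slash cs
    have hjne : PySem.Chars.join ['/'] (w :: ws) ≠ [] :=
      join_ne_nil _ (by simp) (fun x hx => hne x (hw ▸ hx))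
    have hjlen := List.length_pos_of_ne_nil hjne
    by_cases ht : cs.getLast? = some '/'
    · have htr : (if cs.getLast? = some '/' ∧ (w :: ws : List (List Char)) ≠ [] then (['/'] : List Char) else []) = ['/'] :=
        if_pos ⟨ht, by simp⟩
      have hrhs : rhs cs = ((if cs.head? = some '/' then ['/'] else []) ++ PySem.Chars.join ['/'] (w :: ws)) ++ ['/'] := by
        rw [rhs, hw, htr, List.append_assoc]
      rw [hrhs, if_pos ?_, List.dropLast_concat]
      refine ⟨?_, List.getLast?_concat⟩
      simp only [List.length_append, List.length_cons]
      omega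
    · have htr : (if cs.getLast? = some '/' ∧ (w :: ws : List (List Char)) ≠ [] then (['/'] : List Char) else []) = [] :=
        if_neg (by simp [ht])
      have hrhs : rhs cs = (if cs.head? = some '/' then ['/'] else []) ++ PySem.Chars.join ['/'] (w :: ws) := by
        rw [rhs, hw, htr, List.append_nil]
      rw [hrhs, if_neg ?_]
      rintro ⟨-, hlast⟩
      rw [List.getLast?_append_of_ne_nil _ hjne] at hlast
      exact join_last_ne_slash _ (by simp) (fun x hx => hne x (hw ▸ hx))
        (fun x hx => hns x (hw ▸ hx)) hlast

theorem startswith_slash (cs : List Char) :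
    PySem.Chars.startswith cs ['/'] = (cs.head? = some '/' : Bool) := by
  rcases cs with _ | ⟨c, t⟩
  · rfl
  · simp [PySem.Chars.startswith, List.isPrefixOf]
    by_cases hc : c = '/' <;> simp [hc]
    exact Ne.symm hc

theorem ports_agree (url : String) : collapse_slashes_py url = collapse_slashes_py_alt url := by
  by_cases hin : PySem.Str.isIn "//" url = true
  · -- url contains "//": its character list is nonempty
    have hcs : url.toList ≠ [] := by
      have hinf := (PySem.Str.isIn_iff_infix "//" url).mp hin
      intro hnil
      rw [hnil] at hinf
      simp at hinf
    have hsplit : PySem.Str.split? url "/" = some ((segs url.toList).map String.ofList) := by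
      have hmap := PySem.Str.split?_map url "/"
      rw [show ("/" : String).toList = ['/'] from rfl] at hmap
      rw [PySem.Chars.split?] at hmap
      rw [if_neg (by simp)] at hmap
      rw [splitOn_eq_segs] at hmap
      rcases hopt : PySem.Str.split? url "/" with _ | L
      · rw [hopt] at hmap; simp at hmap
      · rw [hopt] at hmap
        simp only [Option.map_some, Option.some.injEq] at hmap
        have : L = (segs url.toList).map String.ofList := by
          rw [← hmap, List.map_map]
          simp [Function.comp_def]
        rw [this]
    rcases hseg : segs url.toList with _ | ⟨h1, r⟩
    · exact absurd hseg (segs_ne_nil url.toList)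
    rw [collapse_slashes_py, collapse_slashes_py_alt, if_pos hin, if_pos hin, hsplit, hseg]
    simp only [List.map_cons, Option.getD_some]
    -- A's loop then filter
    have hloop := foldA ((r.map String.ofList)) [] (String.ofList h1)
    simp only [List.nil_append] at hloop
    -- B's fold
    rcases hct : url.toList with _ | ⟨c, t⟩
    · exact absurd hct hcs
    rw [List.foldl_cons, if_pos (Or.inr (Or.inl rfl))]
    have hB := foldB t [] c
    simp only [List.nil_append] at hB ⊢
    rw [hB]
    rw [bcoll_eq_rhs (c :: t) (by simp), ← hct]
    rw [← String.toList_inj]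
    have hfilter : (String.ofList h1 :: r.map String.ofList).filter (fun p => p ≠ "") =
        (wordsOf url.toList).map String.ofList := by
      rw [← List.map_cons, ← hseg, wordsOf]
      rw [List.filter_map]
      congr 1
      apply List.filter_congr
      intro w _
      simp
    have hcons : (String.ofList h1 :: r.map String.ofList).filter (fun p => p ≠ "") =
        List.filter (fun x => decide (x ≠ "")) [String.ofList h1] ++
          List.filter (fun x => decide (x ≠ "")) (r.map String.ofList) := by
      rw [List.filter_cons]
      split <;> simp_all [List.filter_cons]
    rw [hloop, ← hcons, hfilter]
    have hjoin : (PySem.Str.join "/" ((wordsOf url.toList).map String.ofList)).toList =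
        PySem.Chars.join ['/'] (wordsOf url.toList) := by
      rw [PySem.Str.toList_join, List.map_map]
      simp [Function.comp_def]
    have hsw : PySem.Str.startswith url "/" = (url.toList.head? = some '/' : Bool) := by
      rw [PySem.Str.startswith, show ("/" : String).toList = ['/'] from rfl, startswith_slash]
    rw [hsw, String.toList_ofList, strip_rhs url.toList hcs]
    by_cases hh : url.toList.head? = some '/'
    · rw [if_pos (by simp [hh]), if_pos hh, String.toList_append, hjoin]
      rfl
    · rw [if_neg (by simp [hh]), if_neg hh, hjoin]
      simp
  · rw [collapse_slashes_py, collapse_slashes_py_alt, if_neg hin, if_neg hin]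

-- ===== VERDICT (by name: the statement is the Claim_ definition above) =====
theorem collapse_slashes_py_spec : Claim_equal_collapse_slashes_py :=
  fun url _ => ports_agree url
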